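-- pv_equiv track=rewrite | github.com/Othmane-aoubid/Object-Measurement | backend/app.py | detect_edges
-- ===== SOURCE A (Python) =====
-- def detect_edges(image):
--     height = len(image)
--     width = len(image[0])
--     edges = [[0 for _ in range(width)] for _ in range(height)]
--
--     for y in range(1, height - 1):
--         for x in range(1, width - 1):
--             if image[y][x] != image[y-1][x] or \
--                image[y][x] != image[y+1][x] or \
--                image[y][x] != image[y][x-1] or \
--                image[y][x] != image[y][x+1]:
--                 edges[y][x] = 1
--
--     return edges
-- ===== SOURCE B (Python) =====
-- def detect_edges(image):
--     height = len(image)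
--     width = len(image[0])
--     # difference tables: h[y][x] = image[y][x] != image[y][x+1], v[y][x] = image[y][x] != image[y+1][x]
--     h = [[row[x] != row[x + 1] for x in range(width - 1)] for row in image]
--     v = [[a[x] != b[x] for x in range(width)] for a, b in zip(image, image[1:])]
--
--     def cell(y, x):
--         if 0 < y < height - 1 and 0 < x < width - 1 and \
--            (h[y][x - 1] or h[y][x] or v[y - 1][x] or v[y][x]):
--             return 1
--         return 0
--
--     return [[cell(y, x) for x in range(width)] for y in range(height)]
-- ===== Notes on version B (the rewrite author's own statement) =====
-- stated objective: alternative
-- what changed: Instead of one nested loop that compares each interior pixel with its four neighbours and mutates a zero matrix, B precomputes horizontal and vertical difference tables in two separate passes over rows/row-pairs and then builds the output functionally by a comprehension that ORs four table lookups per interior cell.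
-- outside the precondition, e.g. on detect_edges([[1, 2], [3]]): A returns [[0, 0], [0, 0]], B raises IndexError
import Mathlib
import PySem

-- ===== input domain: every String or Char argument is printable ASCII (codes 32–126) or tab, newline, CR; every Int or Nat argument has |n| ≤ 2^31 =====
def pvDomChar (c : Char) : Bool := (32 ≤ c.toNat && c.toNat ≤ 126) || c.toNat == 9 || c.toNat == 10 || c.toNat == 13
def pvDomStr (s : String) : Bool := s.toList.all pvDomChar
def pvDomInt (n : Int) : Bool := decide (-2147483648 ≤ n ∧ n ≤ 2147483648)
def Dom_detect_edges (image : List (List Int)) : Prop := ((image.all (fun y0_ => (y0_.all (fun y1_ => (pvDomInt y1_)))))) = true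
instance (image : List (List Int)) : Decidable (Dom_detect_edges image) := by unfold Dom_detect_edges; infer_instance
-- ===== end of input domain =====

-- B replaces A's mutate-a-zero-matrix neighbour scan by two precomputed difference
-- tables plus a purely functional comprehension over all cells (objective: alternative).

-- ===== PORT A =====
-- image[y][x] (indices known in range under Pre_)
def pvAt (image : List (List Int)) (y x : Int) : Int :=
  PySem.List.pyGetD (PySem.List.pyGetD image y []) x 0

def detect_edges (image : List (List Int)) : List (List Int) :=
  let height : Int := image.length
  let width : Int := (PySem.List.pyGetD image 0 []).length
  let edges : List (List Int) :=
    (PySem.List.pyRange 0 height 1).map (fun _ =>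
      (PySem.List.pyRange 0 width 1).map (fun _ => (0 : Int)))
  (PySem.List.pyRange 1 (height - 1) 1).foldl (fun edges y =>
    (PySem.List.pyRange 1 (width - 1) 1).foldl (fun edges x =>
      if pvAt image y x != pvAt image (y - 1) x ||
         pvAt image y x != pvAt image (y + 1) x ||
         pvAt image y x != pvAt image y (x - 1) ||
         pvAt image y x != pvAt image y (x + 1) then
        PySem.List.pySetD edges y
          (PySem.List.pySetD (PySem.List.pyGetD edges y []) x 1)
      else edges) edges) edges

-- ===== PORT B =====
-- cell(y, x) of Source B: 1 iff interior and one of the four table entries is true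
def pvCell (height width : Int) (h v : List (List Bool)) (y x : Int) : Int :=
  if 0 < y ∧ y < height - 1 ∧ 0 < x ∧ x < width - 1 ∧
     (PySem.List.pyGetD (PySem.List.pyGetD h y []) (x - 1) false ||
      PySem.List.pyGetD (PySem.List.pyGetD h y []) x false ||
      PySem.List.pyGetD (PySem.List.pyGetD v (y - 1) []) x false ||
      PySem.List.pyGetD (PySem.List.pyGetD v y []) x false) then 1 else 0

def detect_edges_alt (image : List (List Int)) : List (List Int) :=
  let height : Int := image.length
  let width : Int := (PySem.List.pyGetD image 0 []).length
  let h : List (List Bool) := image.map (fun row =>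
    (PySem.List.pyRange 0 (width - 1) 1).map (fun x =>
      PySem.List.pyGetD row x 0 != PySem.List.pyGetD row (x + 1) 0))
  let v : List (List Bool) :=
    (image.zip (PySem.List.slice image (some 1) none)).map (fun p =>
      (PySem.List.pyRange 0 width 1).map (fun x =>
        PySem.List.pyGetD p.1 x 0 != PySem.List.pyGetD p.2 x 0))
  (PySem.List.pyRange 0 height 1).map (fun y =>
    (PySem.List.pyRange 0 width 1).map (fun x => pvCell height width h v y x))

-- ===== PRECONDITION & SPEC =====
-- Pre_ excludes the empty image, where A itself raises IndexError, and ragged images with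
-- a row shorter than the first row, where B's whole-image difference-table passes raise
-- IndexError while A's interior-only scan can still return (see claim cites).
def Pre_detect_edges (image : List (List Int)) : Prop :=
  image ≠ [] ∧ ∀ row ∈ image, (PySem.List.pyGetD image 0 []).length ≤ row.length

instance (image : List (List Int)) : Decidable (Pre_detect_edges image) := by
  unfold Pre_detect_edges; infer_instance

def pvWitness_detect_edges : List (List Int) := [[1, 2, 3], [4, 5, 6], [7, 8, 9]]

def Spec_detect_edges (image : List (List Int)) (out : List (List Int)) : Prop := out = detect_edges_alt image
instance (image : List (List Int)) (out : List (List Int)) : Decidable (Spec_detect_edges image out) := by unfold Spec_detect_edges; infer_instance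

-- ===== CLAIM (what is proved, stated in full; the proofs are below) =====
def Claim_equal_detect_edges : Prop := ∀ (image : List (List Int)), Dom_detect_edges image → Pre_detect_edges image → Spec_detect_edges image (detect_edges image)

-- ===== LEMMAS AND PROOFS =====

lemma pv_setD_getD_self {α : Type} (d : α) (e : List α) (y : Int) (hy : 0 ≤ y)
    (hlt : y.toNat < e.length) :
    PySem.List.pySetD e y (PySem.List.pyGetD e y d) = e := by
  rw [PySem.List.pySetD_of_nonneg e _ hy, PySem.List.pyGetD_eq_getElem e d hy (by omega)]
  exact List.set_getElem_self hlt

lemma pv_inner_row {α : Type} (d : α) (c : Int → Bool) (f : Int → α → α) (y : Int) (hy : 0 ≤ y) :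
    ∀ (xs : List Int) (e : List α), y.toNat < e.length →
    xs.foldl (fun e x => if c x then
        PySem.List.pySetD e y (f x (PySem.List.pyGetD e y d)) else e) e
    = PySem.List.pySetD e y
        (xs.foldl (fun r x => if c x then f x r else r) (PySem.List.pyGetD e y d)) := by
  intro xs
  induction xs with
  | nil => intro e he; simp [pv_setD_getD_self d e y hy he]
  | cons x t ih =>
    intro e he
    simp only [List.foldl_cons]
    by_cases hc : c x
    · simp only [hc, if_true]
      have hset : PySem.List.pySetD e y (f x (PySem.List.pyGetD e y d))
          = e.set y.toNat (f x (PySem.List.pyGetD e y d)) := PySem.List.pySetD_of_nonneg e _ hy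
      rw [ih _ (by rw [hset, List.length_set]; exact he)]
      have hg : PySem.List.pyGetD (PySem.List.pySetD e y (f x (PySem.List.pyGetD e y d))) y d
          = f x (PySem.List.pyGetD e y d) := by
        rw [hset, PySem.List.pyGetD_eq_getElem _ d hy (by rw [List.length_set]; omega)]
        exact List.getElem_set_self (by simpa using he)
      rw [hg, hset, PySem.List.pySetD_of_nonneg _ _ hy, PySem.List.pySetD_of_nonneg e _ hy,
        List.set_set]
    · simp only [hc]
      exact ih e he

lemma pv_fold_set_getElem {α : Type} (d : α) (g : Int → α → α) :
    ∀ (ys : List Int), ys.Nodup → (∀ y ∈ ys, 0 ≤ y) →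
    ∀ (l : List α),
    (ys.foldl (fun e y => PySem.List.pySetD e y (g y (PySem.List.pyGetD e y d))) l).length
        = l.length ∧
    ∀ (i : Nat) (hi : i < l.length),
      (ys.foldl (fun e y => PySem.List.pySetD e y (g y (PySem.List.pyGetD e y d))) l)[i]?
        = some (if (i : Int) ∈ ys then g i (l[i]'hi) else l[i]'hi) := by
  intro ys
  induction ys with
  | nil => intro _ _ l; simp
  | cons y t ih =>
    intro hnd hpos l
    have hy0 : 0 ≤ y := hpos y (by simp)
    obtain ⟨hyt, hndt⟩ := List.nodup_cons.mp hnd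
    simp only [List.foldl_cons]
    set l' := PySem.List.pySetD l y (g y (PySem.List.pyGetD l y d)) with hl'
    have hlen' : l'.length = l.length := by
      simp [hl', PySem.List.length_pySetD]
    obtain ⟨ihlen, ihget⟩ := ih hndt (fun z hz => hpos z (by simp [hz])) l'
    refine ⟨by omega, ?_⟩
    intro i hi
    rw [ihget i (by omega)]
    by_cases hyr : y.toNat < l.length
    · have hset : l' = l.set y.toNat (g y (l[y.toNat]'hyr)) := by
        rw [hl', PySem.List.pySetD_of_nonneg l _ hy0,
          PySem.List.pyGetD_eq_getElem l d hy0 (by omega)]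
      by_cases hiy : (i : Int) = y
      · have hiy' : i = y.toNat := by omega
        have hnt : (i : Int) ∉ t := by rw [hiy]; exact hyt
        rw [if_neg hnt, if_pos (by simp [hiy])]
        subst hiy'
        have hval : l'[y.toNat]'(by omega) = g y (l[y.toNat]'hyr) := by
          simp [hset]
        rw [hval, hiy]
      · have hine : i ≠ y.toNat := by omega
        have hval : l'[i]'(by omega) = l[i]'hi := by
          simp [hset, List.getElem_set_ne (Ne.symm hine)]
        rw [hval]
        simp [List.mem_cons, hiy]
    · have hid : l' = l := by
        rw [hl', PySem.List.pySetD_of_nonneg l _ hy0, List.set_eq_of_length_le (by omega)]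
      have hiy : (i : Int) ≠ y := by omega
      simp [hid, List.mem_cons, hiy]

lemma pv_row_fold (c : Int → Bool) :
    ∀ (xs : List Int), (∀ x ∈ xs, 0 ≤ x) → ∀ (r : List Int),
    (xs.foldl (fun r x => if c x then PySem.List.pySetD r x 1 else r) r).length = r.length ∧
    ∀ (i : Nat) (hi : i < r.length),
      (xs.foldl (fun r x => if c x then PySem.List.pySetD r x 1 else r) r)[i]?
        = some (if (i : Int) ∈ xs ∧ c i then 1 else r[i]'hi) := by
  intro xs
  induction xs with
  | nil => intro _ r; simp
  | cons x t ih =>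
    intro hpos r
    have hx0 : 0 ≤ x := hpos x (by simp)
    simp only [List.foldl_cons]
    set r' := if c x then PySem.List.pySetD r x 1 else r with hr'
    have hlen' : r'.length = r.length := by
      by_cases hc : c x <;> simp [hr', hc, PySem.List.length_pySetD]
    obtain ⟨ihlen, ihget⟩ := ih (fun z hz => hpos z (by simp [hz])) r'
    refine ⟨by omega, ?_⟩
    intro i hi
    rw [ihget i (by omega)]
    by_cases ht : (i : Int) ∈ t ∧ c i
    · rw [if_pos ht, if_pos ⟨by simp [ht.1], ht.2⟩]
    · rw [if_neg ht]
      by_cases hix : (i : Int) = x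
      · -- value at i after the first step
        have hcx : c x = c i := by rw [hix]
        by_cases hci : c (i : Int)
        · have hir : r'[i]'(by omega) = 1 := by
            have : r' = r.set x.toNat 1 := by
              rw [hr', if_pos (by rw [hcx]; exact hci), PySem.List.pySetD_of_nonneg r _ hx0]
            have hixn : i = x.toNat := by omega
            subst hixn
            simp only [this]
            exact List.getElem_set_self (by simpa using hi)
          rw [hir, if_pos ⟨by simp [hix], hci⟩]
        · have hir : r'[i]'(by omega) = r[i]'hi := by
            have : r' = r := by rw [hr', if_neg (by rw [hcx]; exact hci)]
            simp [this]
          rw [hir, if_neg (by rintro ⟨-, h⟩; exact hci h)]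
      · have hir : r'[i]'(by omega) = r[i]'hi := by
          by_cases hc : c x
          · have : r' = r.set x.toNat 1 := by
              rw [hr', if_pos hc, PySem.List.pySetD_of_nonneg r _ hx0]
            simp only [this]
            exact List.getElem_set_ne (show x.toNat ≠ i by omega) (by simpa using hi)
          · have : r' = r := by rw [hr', if_neg hc]
            simp [this]
        rw [hir, if_neg (by rintro ⟨h, hci⟩; rcases List.mem_cons.mp h with h | h; exact hix h; exact ht ⟨h, hci⟩)]

lemma pv_foldl_body_congr {α : Type} (n : Nat) (P : Int → Prop) (F G : List α → Int → List α)
    (hlen : ∀ e y, (G e y).length = e.length)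
    (h : ∀ e y, P y → e.length = n → F e y = G e y) :
    ∀ (ys : List Int) (l : List α), (∀ y ∈ ys, P y) → l.length = n →
      ys.foldl F l = ys.foldl G l := by
  intro ys
  induction ys with
  | nil => intro l _ _; rfl
  | cons y t ih =>
    intro l hys hl
    simp only [List.foldl_cons]
    rw [h l y (hys y (by simp)) hl]
    exact ih _ (fun z hz => hys z (by simp [hz])) (by rw [hlen]; exact hl)


-- proof-side abbreviations for the states of A's loops
def pvCondA (image : List (List Int)) (y x : Int) : Bool :=
  pvAt image y x != pvAt image (y - 1) x ||
  pvAt image y x != pvAt image (y + 1) x ||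
  pvAt image y x != pvAt image y (x - 1) ||
  pvAt image y x != pvAt image y (x + 1)

def pvZRow (W : Nat) : List Int := (PySem.List.pyRange 0 (W : Int) 1).map (fun _ => 0)

def pvZeros (n W : Nat) : List (List Int) :=
  (PySem.List.pyRange 0 (n : Int) 1).map (fun _ => pvZRow W)

def pvRowFun (image : List (List Int)) (y : Int) (r : List Int) : List Int :=
  (PySem.List.pyRange 1 (((PySem.List.pyGetD image 0 []).length : Int) - 1) 1).foldl
    (fun r x => if pvCondA image y x then PySem.List.pySetD r x 1 else r) r

def pvH (image : List (List Int)) : List (List Bool) :=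
  image.map (fun row =>
    (PySem.List.pyRange 0 (((PySem.List.pyGetD image 0 []).length : Int) - 1) 1).map (fun x =>
      PySem.List.pyGetD row x 0 != PySem.List.pyGetD row (x + 1) 0))

def pvV (image : List (List Int)) : List (List Bool) :=
  (image.zip (PySem.List.slice image (some 1) none)).map (fun p =>
    (PySem.List.pyRange 0 ((PySem.List.pyGetD image 0 []).length : Int) 1).map (fun x =>
      PySem.List.pyGetD p.1 x 0 != PySem.List.pyGetD p.2 x 0))


lemma pv_cell_eq (image : List (List Int))
    (y x : Nat) (hy : y < image.length) :
    (if (1 ≤ (y:Int) ∧ (y:Int) < (image.length:Int) - 1) ∧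
        (1 ≤ (x:Int) ∧ (x:Int) < ((PySem.List.pyGetD image 0 []).length:Int) - 1) ∧
        pvCondA image (y:Int) (x:Int) = true then (1:Int) else 0)
    = pvCell (image.length:Int) ((PySem.List.pyGetD image 0 []).length:Int)
        (pvH image) (pvV image) (y:Int) (x:Int) := by
  set n := image.length with hn
  set W := (PySem.List.pyGetD image 0 []).length with hW
  by_cases hy1 : 1 ≤ (y:Int) ∧ (y:Int) < (n:Int) - 1
  case neg =>
    rw [if_neg (by tauto)]
    unfold pvCell
    rw [if_neg (by rintro ⟨c1, c2, -⟩; exact hy1 ⟨by omega, c2⟩)]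
  case pos =>
  by_cases hx1 : 1 ≤ (x:Int) ∧ (x:Int) < (W:Int) - 1
  case neg =>
    rw [if_neg (by tauto)]
    unfold pvCell
    rw [if_neg (by rintro ⟨-, -, c3, c4, -⟩; exact hx1 ⟨by omega, c4⟩)]
  case pos =>
  have hyn : y < n := by omega
  have hrow : ∀ (j : Nat) (hj : j < n), PySem.List.pyGetD image (j:Int) [] = image[j]'hj := by
    intro j hj
    rw [PySem.List.pyGetD_natCast]
    exact List.getD_eq_getElem image [] hj
  have hH : PySem.List.pyGetD (pvH image) (y:Int) []
      = (PySem.List.pyRange 0 ((W:Int) - 1) 1).map (fun t =>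
          PySem.List.pyGetD (image[y]'hyn) t 0 != PySem.List.pyGetD (image[y]'hyn) (t + 1) 0) := by
    unfold pvH
    rw [PySem.List.pyGetD_natCast, List.getD_eq_getElem _ _ (by simpa using hyn),
      List.getElem_map]
  have hV : ∀ (j : Nat) (hj : j + 1 < n), PySem.List.pyGetD (pvV image) (j:Int) []
      = (PySem.List.pyRange 0 (W:Int) 1).map (fun t =>
          PySem.List.pyGetD (image[j]'(by omega)) t 0 !=
          PySem.List.pyGetD (image[j+1]'(by omega)) t 0) := by
    intro j hj
    unfold pvV
    rw [PySem.List.slice_from_one, PySem.List.pyGetD_natCast,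
      List.getD_eq_getElem _ _ (by rw [List.length_map, List.length_zip]; simp; omega),
      List.getElem_map, List.getElem_zip]
    dsimp only
    rw [List.getElem_tail]
  have hkey : pvCondA image (y:Int) (x:Int)
      = (PySem.List.pyGetD (PySem.List.pyGetD (pvH image) (y:Int) []) ((x:Int) - 1) false ||
         PySem.List.pyGetD (PySem.List.pyGetD (pvH image) (y:Int) []) (x:Int) false ||
         PySem.List.pyGetD (PySem.List.pyGetD (pvV image) ((y:Int) - 1) []) (x:Int) false ||
         PySem.List.pyGetD (PySem.List.pyGetD (pvV image) (y:Int) []) (x:Int) false) := by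
    rw [show ((y:Int) - 1) = (((y - 1 : Nat)):Int) from by omega]
    rw [hH, hV (y - 1) (by omega), hV y (by omega),
      PySem.List.pyGetD_map_pyRange_of_nonneg _ _ _ _ (by omega) (by omega),
      PySem.List.pyGetD_map_pyRange_of_nonneg _ _ _ _ (by omega) (by omega),
      PySem.List.pyGetD_map_pyRange_of_nonneg _ _ _ _ (by omega) (by omega),
      PySem.List.pyGetD_map_pyRange_of_nonneg _ _ _ _ (by omega) (by omega)]
    rw [show ((x:Int) - 1 + 1) = (x:Int) from by ring]
    simp only [show (y - 1 + 1 : Nat) = y from by omega]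
    unfold pvCondA pvAt
    rw [show ((y:Int) - 1) = (((y - 1 : Nat)):Int) from by omega,
      show ((y:Int) + 1) = (((y + 1 : Nat)):Int) from by omega,
      hrow y hyn, hrow (y - 1) (by omega), hrow (y + 1) (by omega)]
    rw [Bool.eq_iff_iff]
    simp only [Bool.or_eq_true, bne_iff_ne, ne_comm]
    tauto
  have hLiff : ((1 ≤ (y:Int) ∧ (y:Int) < (n:Int) - 1) ∧
      (1 ≤ (x:Int) ∧ (x:Int) < (W:Int) - 1) ∧ pvCondA image (y:Int) (x:Int) = true)
      ↔ pvCondA image (y:Int) (x:Int) = true := by tauto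
  rw [if_congr hLiff rfl rfl]
  unfold pvCell
  have hRiff : (0 < (y:Int) ∧ (y:Int) < (n:Int) - 1 ∧ 0 < (x:Int) ∧ (x:Int) < (W:Int) - 1 ∧
      (PySem.List.pyGetD (PySem.List.pyGetD (pvH image) (y:Int) []) ((x:Int) - 1) false ||
       PySem.List.pyGetD (PySem.List.pyGetD (pvH image) (y:Int) []) (x:Int) false ||
       PySem.List.pyGetD (PySem.List.pyGetD (pvV image) ((y:Int) - 1) []) (x:Int) false ||
       PySem.List.pyGetD (PySem.List.pyGetD (pvV image) (y:Int) []) (x:Int) false) = true)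
      ↔ pvCondA image (y:Int) (x:Int) = true := by
    rw [← hkey]
    constructor
    · rintro ⟨-, -, -, -, h⟩; exact h
    · intro h; exact ⟨by omega, hy1.2, by omega, hx1.2, h⟩
  rw [if_congr hRiff rfl rfl]

theorem pv_main (image : List (List Int)) (h1 : image ≠ [])
    (_h2 : ∀ row ∈ image, (PySem.List.pyGetD image 0 []).length ≤ row.length) :
    detect_edges image = detect_edges_alt image := by
  have hn1 : 1 ≤ image.length := List.length_pos_of_ne_nil h1
  -- A as a row-update fold
  have stepA : detect_edges image
      = (PySem.List.pyRange 1 ((image.length : Int) - 1) 1).foldl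
          (fun e y => PySem.List.pySetD e y
            (pvRowFun image y (PySem.List.pyGetD e y [])))
          (pvZeros image.length (PySem.List.pyGetD image 0 []).length) := by
    unfold detect_edges
    dsimp only
    refine pv_foldl_body_congr image.length (fun y => 1 ≤ y ∧ y < (image.length : Int) - 1)
      _ _ (fun e y => PySem.List.length_pySetD e y _) ?_ _ _
      (fun y hy => PySem.List.mem_pyRange_one.mp hy) ?_
    · intro e y hy hl
      exact pv_inner_row (d := ([] : List Int)) (c := pvCondA image y)
        (f := fun x r => PySem.List.pySetD r x 1) y (by omega) _ e (by omega)
    · simp [PySem.List.length_pyRange_one]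
  -- B unfolded
  have stepB : detect_edges_alt image
      = (PySem.List.pyRange 0 (image.length : Int) 1).map (fun y =>
          (PySem.List.pyRange 0 ((PySem.List.pyGetD image 0 []).length : Int) 1).map (fun x =>
            pvCell (image.length : Int) ((PySem.List.pyGetD image 0 []).length : Int)
              (pvH image) (pvV image) y x)) := rfl
  -- abbreviations
  set n := image.length with hn
  set W := (PySem.List.pyGetD image 0 []).length with hWdef
  obtain ⟨lenA, getA⟩ := pv_fold_set_getElem ([] : List Int) (pvRowFun image)
    (PySem.List.pyRange 1 ((n : Int) - 1) 1) (PySem.List.nodup_pyRange_one 1 _)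
    (fun y hy => by have := PySem.List.mem_pyRange_one.mp hy; omega) (pvZeros n W)
  have hzlen : (pvZeros n W).length = n := by
    simp [pvZeros, PySem.List.length_pyRange_one]
  have hzrlen : (pvZRow W).length = W := by
    simp [pvZRow, PySem.List.length_pyRange_one]
  have hzget : ∀ (y : Nat) (hy : y < (pvZeros n W).length), (pvZeros n W)[y]'hy = pvZRow W := by
    intro y hy
    simp [pvZeros]
  have hzrget : ∀ (x : Nat) (hx : x < (pvZRow W).length), (pvZRow W)[x]'hx = 0 := by
    intro x hx
    simp [pvZRow]
  -- row characterization of A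
  have rowA := fun (y : Int) => pv_row_fold (pvCondA image y)
    (PySem.List.pyRange 1 ((W : Int) - 1) 1)
    (fun x hx => by have := PySem.List.mem_pyRange_one.mp hx; omega) (pvZRow W)
  rw [stepA, stepB]
  apply List.ext_getElem?
  intro y
  by_cases hy : y < n
  · rw [getA y (by omega), PySem.List.getElem?_map_pyRange_zero _ n y hy]
    rw [hzget y (by omega)]
    congr 1
    apply List.ext_getElem?
    intro x
    by_cases hx : x < W
    · -- left row entry
      have hleft : (if (y : Int) ∈ PySem.List.pyRange 1 ((n:Int) - 1) 1
            then pvRowFun image (y : Int) (pvZRow W) else pvZRow W)[x]?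
          = some (if (y : Int) ∈ PySem.List.pyRange 1 ((n:Int) - 1) 1 ∧
                     (x : Int) ∈ PySem.List.pyRange 1 ((W:Int) - 1) 1 ∧
                     pvCondA image (y : Int) (x : Int) = true then 1 else 0) := by
        by_cases hym : (y : Int) ∈ PySem.List.pyRange 1 ((n:Int) - 1) 1
        · rw [if_pos hym]
          obtain ⟨rlen, rget⟩ := rowA (y : Int)
          have := rget x (by omega)
          rw [show pvRowFun image (y:Int) (pvZRow W)
              = (PySem.List.pyRange 1 ((W : Int) - 1) 1).foldl
                  (fun r x => if pvCondA image (y:Int) x then PySem.List.pySetD r x 1 else r)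
                  (pvZRow W) from rfl, this, hzrget x (by omega)]
          congr 1
          by_cases hxm : (x : Int) ∈ PySem.List.pyRange 1 ((W:Int) - 1) 1 ∧
              pvCondA image (y:Int) (x:Int) = true
          · rw [if_pos hxm, if_pos ⟨hym, hxm.1, hxm.2⟩]
          · rw [if_neg hxm, if_neg (by tauto)]
        · rw [if_neg hym, List.getElem?_eq_getElem (by omega), hzrget x (by omega),
            if_neg (by tauto)]
      rw [hleft, PySem.List.getElem?_map_pyRange_zero _ W x hx]
      congr 1
      -- cell value equality
      simp only [PySem.List.mem_pyRange_one]
      exact pv_cell_eq image y x (by omega)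
    · -- x out of range: both none
      have hlen1 : (if (y : Int) ∈ PySem.List.pyRange 1 ((n:Int) - 1) 1
            then pvRowFun image (y : Int) (pvZRow W) else pvZRow W).length = W := by
        by_cases hym : (y : Int) ∈ PySem.List.pyRange 1 ((n:Int) - 1) 1
        · rw [if_pos hym,
            show pvRowFun image (y:Int) (pvZRow W)
              = (PySem.List.pyRange 1 ((W : Int) - 1) 1).foldl
                  (fun r x => if pvCondA image (y:Int) x then PySem.List.pySetD r x 1 else r)
                  (pvZRow W) from rfl,
            (rowA (y:Int)).1, hzrlen]
        · rw [if_neg hym, hzrlen]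
      rw [List.getElem?_eq_none (by omega), List.getElem?_eq_none (by
        simp [PySem.List.length_pyRange_one]; omega)]
  · rw [List.getElem?_eq_none (by omega), List.getElem?_eq_none (by
      simp [PySem.List.length_pyRange_one]; omega)]

-- ===== VERDICT (by name: the statement is the Claim_ definition above) =====
theorem detect_edges_spec : Claim_equal_detect_edges := by
  intro image _ hpre
  exact pv_main image hpre.1 hpre.2
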